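-- pv_equiv track=rewrite | github.com/sbwcwso/Nand2Tetris | projects/07/VMtranslator.py | remove_extra_whitespace_comments
-- ===== SOURCE A (Python) =====
-- def remove_extra_whitespace_comments(line: str) -> str:
--     res = ""
--     for i in range(len(line)):
--         if line[i].isspace() and i + 1 < len(line) and line[i+1].isspace():
--             # Remove the extra space
--             continue
--         if line[i:i+2] == "//":
--             break
--         res += line[i]
--     return res.strip()
-- ===== SOURCE B (Python) =====
-- def remove_extra_whitespace_comments(line: str) -> str:
--     idx = line.find("//")
--     if idx != -1:
--         line = line[:idx]
--     out = []
--     i, n = 0, len(line)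
--     while i < n:
--         j = i
--         while j < n and line[j].isspace() == line[i].isspace():
--             j += 1
--         run = line[i:j]
--         out.append(run[-1] if line[i].isspace() else run)
--         i = j
--     return ''.join(out).strip()
-- ===== Notes on version B (the rewrite author's own statement) =====
-- stated objective: alternative
-- what changed: A's single index loop with per-character look-ahead (skip a whitespace char whose successor is whitespace, break on '//') is replaced by a find-and-truncate pass (line.find('//') then slice) followed by a two-pointer scan over maximal runs of equal isspace-ness, keeping the last character of each whitespace run.
import Mathlib
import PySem

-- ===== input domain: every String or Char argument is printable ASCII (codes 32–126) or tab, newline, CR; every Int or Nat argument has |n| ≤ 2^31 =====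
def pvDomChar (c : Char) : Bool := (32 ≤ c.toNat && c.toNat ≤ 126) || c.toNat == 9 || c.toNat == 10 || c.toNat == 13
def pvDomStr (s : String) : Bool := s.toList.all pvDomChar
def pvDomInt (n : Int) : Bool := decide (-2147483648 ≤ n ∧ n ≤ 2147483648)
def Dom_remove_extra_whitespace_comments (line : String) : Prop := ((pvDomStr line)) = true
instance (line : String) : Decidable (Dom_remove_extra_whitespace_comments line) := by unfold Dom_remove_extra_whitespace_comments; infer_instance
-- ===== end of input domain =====

-- B replaces A's per-character look-ahead loop by a find-and-truncate pass followed by a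
-- whitespace-run scan (keep the last char of each run); different decomposition, same cost.


-- ===== PORT A =====
-- 'line[i+1].isspace()' guarded by 'i + 1 < len(line)': whether the next character is whitespace
def pvNextSpace : List Char → Bool
  | [] => false
  | d :: _ => PySem.Chars.isspace d

-- 'line[i:i+2] == "//"': true iff this char and the next are both '/'
def pvNextSlash : List Char → Bool
  | [] => false
  | d :: _ => d == '/'

-- the index loop of A, as structural recursion over the characters: 'continue' when this char
-- and the next are both whitespace, 'break' on "//", otherwise keep the char (res += line[i]).
def pvAGo : List Char → List Char
  | [] => []
  | c :: rest =>
    if PySem.Chars.isspace c && pvNextSpace rest then pvAGo rest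
    else if c == '/' && pvNextSlash rest then []
    else c :: pvAGo rest

def remove_extra_whitespace_comments (line : String) : String :=
  String.ofList (PySem.Chars.strip (pvAGo line.toList))

-- ===== PORT B =====
-- Source B's while-loop: scan maximal runs of equal isspace-ness; a whitespace run contributes its
-- last character (run[-1] = tw.getLastD c for run = c :: tw), a non-space run contributes itself.
def pvBGo : List Char → List Char
  | [] => []
  | c :: rest =>
    (if PySem.Chars.isspace c then
        [(rest.takeWhile (fun d => PySem.Chars.isspace d == PySem.Chars.isspace c)).getLastD c]
      else c :: rest.takeWhile (fun d => PySem.Chars.isspace d == PySem.Chars.isspace c))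
      ++ pvBGo (rest.dropWhile (fun d => PySem.Chars.isspace d == PySem.Chars.isspace c))
termination_by xs => xs.length
decreasing_by
  simp only [List.length_cons]
  have := List.length_dropWhile_le (fun d => PySem.Chars.isspace d == PySem.Chars.isspace c) rest
  omega

def remove_extra_whitespace_comments_alt (line : String) : String :=
  let cs := line.toList
  let idx := PySem.Chars.find cs ['/', '/']
  let cs' := if idx == -1 then cs else PySem.List.slice cs none (some idx)
  String.ofList (PySem.Chars.strip (pvBGo cs'))

-- ===== PRECONDITION & SPEC =====
def Spec_remove_extra_whitespace_comments (line : String) (out : String) : Prop := out = remove_extra_whitespace_comments_alt line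
instance (line : String) (out : String) : Decidable (Spec_remove_extra_whitespace_comments line out) := by unfold Spec_remove_extra_whitespace_comments; infer_instance

-- ===== CLAIM (what is proved, stated in full; the proofs are below) =====
def Claim_equal_remove_extra_whitespace_comments : Prop := ∀ (line : String), Dom_remove_extra_whitespace_comments line → Spec_remove_extra_whitespace_comments line (remove_extra_whitespace_comments line)

-- ===== LEMMAS AND PROOFS =====

-- proof helper: truncation at the first "//" occurrence, structurally.
def pvTrunc : List Char → List Char
  | [] => []
  | c :: rest =>
    if c == '/' && pvNextSlash rest then []
    else c :: pvTrunc rest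

-- proof helper: A's collapse loop without the comment branch.
def pvAGo' : List Char → List Char
  | [] => []
  | c :: rest =>
    if PySem.Chars.isspace c && pvNextSpace rest then pvAGo' rest
    else c :: pvAGo' rest

lemma pvTrunc_of_not_infix (cs : List Char) (h : ¬ ['/', '/'] <:+: cs) : pvTrunc cs = cs := by
  induction cs with
  | nil => rfl
  | cons c rest ih =>
    have hsl : (c == '/' && pvNextSlash rest) = false := by
      cases rest with
      | nil => simp [pvNextSlash]
      | cons d r2 =>
        by_contra hb
        have hb' : (c == '/' && pvNextSlash (d :: r2)) = true := by
          revert hb; cases (c == '/' && pvNextSlash (d :: r2)) <;> simp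
        simp [pvNextSlash] at hb'
        exact h ⟨[], r2, by simp [hb'.1, hb'.2]⟩
    have h2 : ¬ ['/', '/'] <:+: rest := fun hinf => h (hinf.trans ⟨[c], [], by simp⟩)
    rw [pvTrunc, if_neg (by simp [hsl]), ih h2]

lemma pvTrunc_eq_take (cs : List Char) (n : Nat)
    (hpre : ['/', '/'] <+: cs.drop n) (hmin : ∀ i < n, ¬ ['/', '/'] <+: cs.drop i) :
    pvTrunc cs = cs.take n := by
  induction cs generalizing n with
  | nil =>
    rw [pvTrunc.eq_def]
    simp at hpre
  | cons c rest ih =>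
    cases n with
    | zero =>
      obtain ⟨t, ht⟩ := hpre
      simp only [List.drop_zero] at ht
      injection ht with h1 h2
      subst h1; subst h2
      simp [pvTrunc, pvNextSlash]
    | succ m =>
      have hhead : ¬ ['/', '/'] <+: (c :: rest) := by
        have := hmin 0 (Nat.succ_pos m)
        simpa using this
      have hsl : (c == '/' && pvNextSlash rest) = false := by
        cases rest with
        | nil => simp [pvNextSlash]
        | cons d r2 =>
          by_contra hb
          have hb' : (c == '/' && pvNextSlash (d :: r2)) = true := by
            revert hb; cases (c == '/' && pvNextSlash (d :: r2)) <;> simp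
          simp [pvNextSlash] at hb'
          exact hhead ⟨r2, by simp [hb'.1, hb'.2]⟩
      rw [pvTrunc, if_neg (by simp [hsl]), List.take_succ_cons]
      refine congrArg (c :: ·) ?_
      exact ih m (by simpa using hpre) (fun i hi => by
        have := hmin (i + 1) (by omega)
        simpa using this)

-- A's loop equals A's comment-free collapse applied to the truncated input.
lemma pvAGo_eq_aGo'_trunc (cs : List Char) : pvAGo cs = pvAGo' (pvTrunc cs) := by
  induction cs with
  | nil => rfl
  | cons c rest ih =>
    by_cases hsl : (c == '/' && pvNextSlash rest) = true
    · have hc : c = '/' := by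
        cases rest with
        | nil => simp [pvNextSlash] at hsl
        | cons d r2 => simp [pvNextSlash] at hsl; exact hsl.1
      have hws : (PySem.Chars.isspace c && pvNextSpace rest) = false := by
        subst hc; simp [show PySem.Chars.isspace '/' = false from by decide]
      rw [pvAGo, if_neg (by simp [hws]), if_pos hsl, pvTrunc, if_pos hsl, pvAGo']
    · have hsl' : (c == '/' && pvNextSlash rest) = false := by
        revert hsl; cases (c == '/' && pvNextSlash rest) <;> simp
      by_cases hws : (PySem.Chars.isspace c && pvNextSpace rest) = true
      · cases rest with
        | nil => simp [pvNextSpace] at hws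
        | cons d r2 =>
          simp only [pvNextSpace, Bool.and_eq_true] at hws
          have hd' : (d == '/') = false := by
            cases hdec : (d == '/') with
            | true =>
              exfalso
              have hd : d = '/' := by simpa using hdec
              rw [hd] at hws
              exact absurd hws.2 (by decide)
            | false => rfl
          have hdsl : (d == '/' && pvNextSlash r2) = false := by
            rw [hd', Bool.false_and]
          rw [pvAGo, if_pos (by simp [hws.1, hws.2, pvNextSpace]), ih]
          rw [show pvTrunc (c :: d :: r2) = c :: d :: pvTrunc r2 from by
            rw [pvTrunc, if_neg (by simp [hsl']), pvTrunc, if_neg (by rw [hdsl]; simp)]]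
          rw [show pvTrunc (d :: r2) = d :: pvTrunc r2 from by
            rw [pvTrunc, if_neg (by rw [hdsl]; simp)]]
          conv_rhs => rw [pvAGo']
          rw [if_pos (by simp [hws.1, hws.2, pvNextSpace])]
      · have hws' : (PySem.Chars.isspace c && pvNextSpace rest) = false := by
          revert hws; cases (PySem.Chars.isspace c && pvNextSpace rest) <;> simp
        rw [pvAGo, if_neg (by simp [hws']), if_neg (by simp [hsl']),
          pvTrunc, if_neg (by simp [hsl']), ih]
        cases rest with
        | nil =>
          rw [show pvTrunc ([] : List Char) = [] from rfl]
          conv_rhs => rw [pvAGo']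
          rw [if_neg (by simp [pvNextSpace])]
        | cons d r2 =>
          by_cases hdsl : (d == '/' && pvNextSlash r2) = true
          · rw [pvTrunc, if_pos hdsl]
            conv_rhs => rw [pvAGo']
            rw [if_neg (by simp [pvNextSpace])]
          · have hdsl' : (d == '/' && pvNextSlash r2) = false := by
              revert hdsl; cases (d == '/' && pvNextSlash r2) <;> simp
            rw [pvTrunc, if_neg (by simp [hdsl'])]
            conv_rhs => rw [pvAGo']
            rw [if_neg (by
              simp only [pvNextSpace] at hws' ⊢
              simp [hws'])]

-- a whitespace run collapses to its last character
lemma pvAGo'_space_run (rest : List Char) : ∀ c, PySem.Chars.isspace c = true →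
    pvAGo' (c :: rest) =
      (rest.takeWhile (fun d => PySem.Chars.isspace d)).getLastD c
        :: pvAGo' (rest.dropWhile (fun d => PySem.Chars.isspace d)) := by
  induction rest with
  | nil => intro c hc; simp [pvAGo', pvNextSpace]
  | cons d r2 ih =>
    intro c hc
    by_cases hd : PySem.Chars.isspace d = true
    · rw [pvAGo', if_pos (by simp [pvNextSpace, hc, hd]), ih d hd,
        List.takeWhile_cons_of_pos (by simpa using hd),
        List.dropWhile_cons_of_pos (by simpa using hd), List.getLastD_cons]
    · rw [pvAGo', if_neg (by simp [pvNextSpace, hd]),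
        List.takeWhile_cons_of_neg (by simpa using hd),
        List.dropWhile_cons_of_neg (by simpa using hd)]
      simp

-- a non-space run passes through unchanged
lemma pvAGo'_nonspace_run (rest : List Char) :
    pvAGo' rest =
      rest.takeWhile (fun d => PySem.Chars.isspace d == false)
        ++ pvAGo' (rest.dropWhile (fun d => PySem.Chars.isspace d == false)) := by
  induction rest with
  | nil => simp
  | cons d r2 ih =>
    by_cases hd : PySem.Chars.isspace d = true
    · rw [List.takeWhile_cons_of_neg (by simp [hd]),
        List.dropWhile_cons_of_neg (by simp [hd])]
      simp
    · have hd' : PySem.Chars.isspace d = false := by simpa using hd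
      rw [List.takeWhile_cons_of_pos (by simp [hd']),
        List.dropWhile_cons_of_pos (by simp [hd']),
        pvAGo', if_neg (by simp [hd'])]
      exact congrArg (d :: ·) ih

-- the comment-free collapse equals B's run scan
lemma pvAGo'_eq_pvBGo (xs : List Char) : pvAGo' xs = pvBGo xs := by
  induction xs using pvBGo.induct with
  | case1 => rw [pvAGo', pvBGo]
  | case2 c rest ih =>
    by_cases hc : PySem.Chars.isspace c = true
    · have hp : (fun d => PySem.Chars.isspace d == PySem.Chars.isspace c)
          = (fun d => PySem.Chars.isspace d) := by
        funext d; simp [hc]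
      rw [pvBGo, if_pos hc, hp]
      rw [hp] at ih
      rw [pvAGo'_space_run rest c hc, ← ih]
      simp
    · have hc' : PySem.Chars.isspace c = false := by simpa using hc
      have hp : (fun d => PySem.Chars.isspace d == PySem.Chars.isspace c)
          = (fun d => PySem.Chars.isspace d == false) := by
        funext d; simp [hc']
      rw [pvBGo, if_neg (by simp [hc']), hp]
      rw [hp] at ih
      rw [pvAGo', if_neg (by simp [hc', pvNextSpace]), pvAGo'_nonspace_run rest, ← ih]
      simp

-- B's find-and-truncate equals the structural truncation
lemma pvCut_eq_trunc (cs : List Char) :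
    (if (PySem.Chars.find cs ['/', '/'] == -1) = true then cs
     else PySem.List.slice cs none (some (PySem.Chars.find cs ['/', '/']))) = pvTrunc cs := by
  by_cases h : PySem.Chars.find cs ['/', '/'] = -1
  · rw [if_pos (by simp [h])]
    exact (pvTrunc_of_not_infix cs ((PySem.Chars.find_eq_neg_one_iff cs ['/', '/']).mp h)).symm
  · rw [if_neg (by simp [h])]
    have hnn : 0 ≤ PySem.Chars.find cs ['/', '/'] := by
      have := PySem.Chars.neg_one_le_find cs ['/', '/']
      omega
    obtain ⟨hpre, hmin⟩ := PySem.Chars.find_spec hnn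
    rw [PySem.List.slice_to cs hnn]
    exact (pvTrunc_eq_take cs (PySem.Chars.find cs ['/', '/']).toNat hpre hmin).symm

-- ===== VERDICT (by name: the statement is the Claim_ definition above) =====
theorem remove_extra_whitespace_comments_spec : Claim_equal_remove_extra_whitespace_comments := by
  intro line _
  unfold Spec_remove_extra_whitespace_comments
  simp only [remove_extra_whitespace_comments, remove_extra_whitespace_comments_alt]
  rw [pvCut_eq_trunc line.toList, ← pvAGo'_eq_pvBGo, ← pvAGo_eq_aGo'_trunc]
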